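-- pv_equiv track=rewrite | github.com/dinisius/python-training | rai/training/state_space_search/trash tower of hanoi/chat.py | dfs
-- ===== SOURCE A (Python) =====
-- from copy import deepcopy
--
-- def is_valid_move(state, from_peg, to_peg):
--     if not state[from_peg]:
--         return False
--     if not state[to_peg]:
--         return True
--     return state[from_peg][-1] < state[to_peg][-1]
--
-- def move(state, from_peg, to_peg):
--     new_state = deepcopy(state)
--     disk = new_state[from_peg].pop()
--     new_state[to_peg].append(disk)
--     return new_state
--
-- def state_to_tuple(state):
--     return tuple(tuple(peg) for peg in state)
--
-- def dfs(state, goal, visited, path):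
--     if state == goal:
--         return path
--
--     visited.add(state_to_tuple(state))
--
--     for i in range(3):
--         for j in range(3):
--             if i != j and is_valid_move(state, i, j):
--                 new_state = move(state, i, j)
--                 t = state_to_tuple(new_state)
--
--                 if t not in visited:
--                     result = dfs(new_state, goal, visited, path + [(i, j)])
--                     if result:
--                         return result
--     return None
-- ===== SOURCE B (Python) =====
-- def is_valid_move(state, from_peg, to_peg):
--     if not state[from_peg]:
--         return False
--     if not state[to_peg]:
--         return True
--     return state[from_peg][-1] < state[to_peg][-1]
--
-- def move(state, from_peg, to_peg):
--     from copy import deepcopy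
--     new_state = deepcopy(state)
--     disk = new_state[from_peg].pop()
--     new_state[to_peg].append(disk)
--     return new_state
--
-- def state_to_tuple(state):
--     return tuple(tuple(peg) for peg in state)
--
-- def dfs(state, goal, visited, path):
--     stack = [(state, path)]
--     while stack:
--         s, p = stack.pop()
--         if s == goal:
--             return p
--         t = state_to_tuple(s)
--         if t in visited:
--             continue
--         visited.add(t)
--         children = []
--         for i in range(3):
--             for j in range(3):
--                 if i != j and is_valid_move(s, i, j):
--                     ns = move(s, i, j)
--                     if state_to_tuple(ns) not in visited:
--                         children.append((ns, p + [(i, j)]))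
--         for child in reversed(children):
--             stack.append(child)
--     return None
-- ===== Notes on version B (the rewrite author's own statement) =====
-- stated objective: alternative
-- what changed: Replaces the recursive DFS (nested i,j loops, recursion, truthiness-filtered early return) by an iterative explicit-stack DFS that pops (state, path) frames, re-checks visited at pop time and pushes the generated children in reverse order so they are explored in the same preorder.
-- outside the precondition, e.g. on dfs([[1], [], []], [[], [], [1]], {((1,), (), ())}, []): A returns [(0, 1), (1, 2)], B returns None
import Mathlib
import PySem

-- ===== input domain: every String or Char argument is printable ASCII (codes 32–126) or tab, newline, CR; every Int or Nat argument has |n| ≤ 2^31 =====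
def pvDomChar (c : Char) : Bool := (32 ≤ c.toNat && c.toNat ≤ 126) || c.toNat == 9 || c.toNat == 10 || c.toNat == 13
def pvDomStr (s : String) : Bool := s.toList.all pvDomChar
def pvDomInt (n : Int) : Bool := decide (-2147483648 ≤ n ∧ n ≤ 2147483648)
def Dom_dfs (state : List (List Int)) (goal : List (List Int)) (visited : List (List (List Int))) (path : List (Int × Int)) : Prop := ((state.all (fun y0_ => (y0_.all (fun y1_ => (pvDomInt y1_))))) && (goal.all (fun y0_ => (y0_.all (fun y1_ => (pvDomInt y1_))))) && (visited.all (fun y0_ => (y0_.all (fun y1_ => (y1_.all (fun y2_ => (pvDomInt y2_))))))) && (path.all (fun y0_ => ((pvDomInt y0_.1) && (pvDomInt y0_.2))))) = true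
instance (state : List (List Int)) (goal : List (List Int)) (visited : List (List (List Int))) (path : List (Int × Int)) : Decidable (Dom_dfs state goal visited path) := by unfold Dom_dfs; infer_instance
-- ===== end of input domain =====

-- B replaces A's recursive DFS by an iterative explicit-stack DFS with the same preorder
-- (objective: alternative).  Both Pythons mutate the caller's `visited` set identically inside
-- Pre_; the equivalence proved here is about the RETURN value.
-- Both ports carry a fuel parameter as a pure totality guard; the fuel bounds used in dfs /
-- dfs_alt are proved sufficient below (dfsA_some, loopB_some), so no admitted input hits them.

-- ===== PORT A =====
-- shared helpers of the Python module (is_valid_move / move / state_to_tuple; the tuple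
-- conversion is the identity under the List representation)
def isValidMove (s : List (List Int)) (i j : Int) : Bool :=
  match PySem.List.pyGet? s i, PySem.List.pyGet? s j with
  | some pi, some pj =>
    if pi.isEmpty then false
    else if pj.isEmpty then true
    else decide (PySem.List.pyGetD pi (-1) 0 < PySem.List.pyGetD pj (-1) 0)
  | _, _ => false   -- Python raises IndexError on a missing peg; unreachable inside Pre_

def moveF (s : List (List Int)) (i j : Int) : List (List Int) :=
  -- deepcopy; new_state[i].pop(); new_state[j].append(disk) — expressed as functional updates
  let pi := PySem.List.pyGetD s i []
  let disk := PySem.List.pyGetD pi (-1) 0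
  let s1 := PySem.List.pySetD s i pi.dropLast
  let pj := PySem.List.pyGetD s1 j []
  PySem.List.pySetD s1 j (pj ++ [disk])

-- for i in range(3): for j in range(3)
def pairsAll : List (Int × Int) :=
  (PySem.List.pyRange 0 3 1).flatMap (fun i => (PySem.List.pyRange 0 3 1).map (fun j => (i, j)))

def truthy (r : Option (List (Int × Int))) : Bool :=
  match r with | some l => !l.isEmpty | none => false

-- the two nested for-loops of A, with `rec` the recursive call (A's dfs at the next fuel level);
-- returns (result, visited)
def goA (rec : List (List Int) → List (List Int) → List (List (List Int)) → List (Int × Int) →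
           Option (Option (List (Int × Int)) × List (List (List Int)))) :
    List (Int × Int) → List (List Int) → List (List Int) → List (List (List Int)) →
    List (Int × Int) → Option (Option (List (Int × Int)) × List (List (List Int)))
  | [], _, _, v, _ => some (none, v)
  | (i, j) :: rest, s, g, v, p =>
    if i ≠ j ∧ isValidMove s i j then
      let ns := moveF s i j
      if ns ∈ v then goA rec rest s g v p
      else
        match rec ns g v (p ++ [(i, j)]) with
        | none => none
        | some (r, v') => if truthy r then some (r, v') else goA rec rest s g v' p
    else goA rec rest s g v p

def dfsA : Nat → List (List Int) → List (List Int) → List (List (List Int)) → List (Int × Int) →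
    Option (Option (List (Int × Int)) × List (List (List Int)))
  | 0, _, _, _, _ => none
  | f + 1, s, g, v, p =>
    if s = g then some (some p, v)
    else goA (dfsA f) pairsAll s g (PySem.Set.add v s) p

-- fuel bound: the number of reachable states (triples with a permuted flatten) is at most
-- m! * (m+1)^n for m disks on n pegs; proved sufficient in dfsA_some below
def stBound (s : List (List Int)) : Nat :=
  (s.flatten.length).factorial * (s.flatten.length + 1) ^ s.length + 1

def dfs (state : List (List Int)) (goal : List (List Int)) (visited : List (List (List Int))) (path : List (Int × Int)) : Option (List (Int × Int)) :=
  match dfsA (stBound state) state goal visited path with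
  | some (r, _) => r
  | none => none   -- fuel exhaustion: proved unreachable

-- ===== PORT B =====
-- children list built by the two nested for-loops with append
def childrenOf (s : List (List Int)) (p : List (Int × Int)) (v : List (List (List Int))) :
    List (List (List Int) × List (Int × Int)) :=
  pairsAll.foldl (fun acc ij =>
    if decide (ij.1 ≠ ij.2) && isValidMove s ij.1 ij.2 && decide (moveF s ij.1 ij.2 ∉ v)
    then acc ++ [(moveF s ij.1 ij.2, p ++ [ij])] else acc) []

-- the while-loop of B; the stack is modeled with its TOP AT THE HEAD, so Source B's
-- "push reversed(children); pop()" is "prepend children in generation order; take the head"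
def loopB : Nat → List (List (List Int) × List (Int × Int)) → List (List Int) →
    List (List (List Int)) → Option (Option (List (Int × Int)) × List (List (List Int)))
  | 0, _, _, _ => none
  | _ + 1, [], _, v => some (none, v)
  | f + 1, (s, p) :: rest, g, v =>
    if s = g then some (some p, v)
    else if s ∈ v then loopB f rest g v
    else
      let v1 := PySem.Set.add v s
      loopB f (childrenOf s p v1 ++ rest) g v1

def bBound (s : List (List Int)) : Nat := 9 * stBound s + 2

def dfs_alt (state : List (List Int)) (goal : List (List Int)) (visited : List (List (List Int))) (path : List (Int × Int)) : Option (List (Int × Int)) :=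
  match loopB (bBound state) [(state, path)] goal visited with
  | some (r, _) => r
  | none => none   -- fuel exhaustion: proved unreachable

-- ===== PRECONDITION & SPEC =====
-- Pre_ excludes (a) inputs where Python raises IndexError (fewer than 3 pegs, unless start=goal),
-- and (b) the defensible corner start ∈ visited with start ≠ goal, where A explores the
-- pre-visited start while B skips it (whether a search may start from an already-visited state
-- is unspecified; both behaviours are defensible).
def Pre_dfs (state : List (List Int)) (goal : List (List Int)) (visited : List (List (List Int))) (path : List (Int × Int)) : Prop :=
  state = goal ∨ (3 ≤ state.length ∧ state ∉ visited)
instance (state : List (List Int)) (goal : List (List Int)) (visited : List (List (List Int))) (path : List (Int × Int)) : Decidable (Pre_dfs state goal visited path) := by unfold Pre_dfs; infer_instance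

def pvWitness_dfs : List (List Int) × List (List Int) × List (List (List Int)) × (List (Int × Int)) :=
  ([[1], [], []], [[], [], [1]], [], [])

def Spec_dfs (state : List (List Int)) (goal : List (List Int)) (visited : List (List (List Int))) (path : List (Int × Int)) (out : Option (List (Int × Int))) : Prop := out = dfs_alt state goal visited path
instance (state : List (List Int)) (goal : List (List Int)) (visited : List (List (List Int))) (path : List (Int × Int)) (out : Option (List (Int × Int))) : Decidable (Spec_dfs state goal visited path out) := by unfold Spec_dfs; infer_instance

-- ===== CLAIM (what is proved, stated in full; the proofs are below) =====
def Claim_equal_dfs : Prop := ∀ (state : List (List Int)) (goal : List (List Int)) (visited : List (List (List Int))) (path : List (Int × Int)), Dom_dfs state goal visited path → Pre_dfs state goal visited path → Spec_dfs state goal visited path (dfs state goal visited path)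


-- ===== LEMMAS AND PROOFS =====

-- ---- finite state space: all lists of pegs with a permuted flatten ----
def splitsN : Nat → List Int → List (List (List Int))
  | 0, l => if l.isEmpty then [[]] else []
  | n + 1, l => (List.range (l.length + 1)).flatMap
      (fun k => (splitsN n (l.drop k)).map (fun t => l.take k :: t))

lemma mem_splitsN : ∀ (n : Nat) (l : List Int) (t : List (List Int)),
    t ∈ splitsN n l ↔ t.length = n ∧ t.flatten = l := by
  intro n
  induction n with
  | zero =>
    intro l t
    simp only [splitsN]
    by_cases h : l.isEmpty <;>
      simp_all [List.isEmpty_iff, List.length_eq_zero_iff]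
  | succ n ih =>
    intro l t
    simp only [splitsN, List.mem_flatMap, List.mem_map, List.mem_range]
    constructor
    · rintro ⟨k, hk, t', ht', rfl⟩
      rcases (ih _ _).1 ht' with ⟨hl, hf⟩
      simp [hl, hf]
    · rintro ⟨hlen, hf⟩
      cases t with
      | nil => simp at hlen
      | cons h t' =>
        refine ⟨h.length, ?_, t', ?_, ?_⟩
        · subst hf; simp only [List.flatten_cons, List.length_append]; omega
        · refine (ih _ _).2 ⟨by simpa using hlen, ?_⟩
          subst hf; simp
        · subst hf; simp

def TFin (s : List (List Int)) : Finset (List (List Int)) :=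
  (s.flatten.permutations.flatMap (splitsN s.length)).toFinset

lemma mem_TFin {s t : List (List Int)} :
    t ∈ TFin s ↔ t.length = s.length ∧ t.flatten.Perm s.flatten := by
  simp only [TFin, List.mem_toFinset, List.mem_flatMap, List.mem_permutations]
  constructor
  · rintro ⟨p, hp, ht⟩
    rcases (mem_splitsN _ _ _).1 ht with ⟨h1, h2⟩
    exact ⟨h1, by rw [h2]; exact hp⟩
  · rintro ⟨h1, h2⟩
    exact ⟨t.flatten, h2, (mem_splitsN _ _ _).2 ⟨h1, rfl⟩⟩

lemma self_mem_TFin (s : List (List Int)) : s ∈ TFin s :=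
  mem_TFin.2 ⟨rfl, List.Perm.refl _⟩

lemma TFin_congr {s t : List (List Int)} (h : t ∈ TFin s) : TFin t = TFin s := by
  rcases mem_TFin.1 h with ⟨h1, h2⟩
  ext x
  simp only [mem_TFin, h1]
  exact and_congr_right (fun _ => ⟨fun hx => hx.trans h2, fun hx => hx.trans h2.symm⟩)

lemma length_splitsN_le : ∀ (n : Nat) (l : List Int),
    (splitsN n l).length ≤ (l.length + 1) ^ n := by
  intro n
  induction n with
  | zero => intro l; simp only [splitsN]; split <;> simp
  | succ n ih =>
    intro l
    simp only [splitsN, List.length_flatMap]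
    calc ((List.range (l.length + 1)).map (fun k => ((splitsN n (l.drop k)).map (fun t => l.take k :: t)).length)).sum
        ≤ ((List.range (l.length + 1)).map (fun _ => (l.length + 1) ^ n)).sum := by
          apply List.sum_le_sum
          intro k _
          simp only [List.length_map]
          exact le_trans (ih (l.drop k)) (Nat.pow_le_pow_left (by simp) n)
      _ = (l.length + 1) * (l.length + 1) ^ n := by
          simp [List.map_const', List.sum_replicate, smul_eq_mul]
      _ = (l.length + 1) ^ (n + 1) := by ring

lemma card_TFin_le (s : List (List Int)) :
    (TFin s).card ≤ (s.flatten.length).factorial * (s.flatten.length + 1) ^ s.length := by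
  refine le_trans (List.toFinset_card_le _) ?_
  rw [List.length_flatMap]
  calc (s.flatten.permutations.map (fun p => (splitsN s.length p).length)).sum
      ≤ (s.flatten.permutations.map (fun _ => (s.flatten.length + 1) ^ s.length)).sum := by
        apply List.sum_le_sum
        intro p hp
        have hlen : p.length = s.flatten.length :=
          (List.mem_permutations.1 hp).length_eq
        exact le_trans (length_splitsN_le _ _) (by rw [hlen])
    _ = s.flatten.permutations.length * (s.flatten.length + 1) ^ s.length := by
        simp [List.map_const', List.sum_replicate, smul_eq_mul]
    _ = (s.flatten.length).factorial * (s.flatten.length + 1) ^ s.length := by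
        rw [List.length_permutations]

-- ---- the move helper stays inside the state space ----
lemma flatten_set_ms : ∀ (s : List (List Int)) (k : Nat) (hk : k < s.length) (x : List Int),
    ((s.set k x).flatten : Multiset Int) + (s[k]'hk : List Int) =
      (s.flatten : Multiset Int) + x := by
  intro s
  induction s with
  | nil => intro k hk; simp at hk
  | cons a t ih =>
    intro k hk x
    cases k with
    | zero =>
      simp only [List.set_cons_zero, List.flatten_cons, List.getElem_cons_zero,
        ← Multiset.coe_add]
      abel
    | succ k =>
      have hk' : k < t.length := by simpa using hk
      simp only [List.set_cons_succ, List.flatten_cons, List.getElem_cons_succ,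
        ← Multiset.coe_add]
      have := ih k hk' x
      calc ((a : Multiset Int) + ↑(t.set k x).flatten) + ↑(t[k]'hk') = ↑a + (↑(t.set k x).flatten + ↑(t[k]'hk')) := by abel
        _ = ↑a + (↑t.flatten + ↑x) := by rw [this]
        _ = ↑a + ↑t.flatten + ↑x := by abel

lemma isValidMove_elim {s : List (List Int)} {i j : Int} (h : isValidMove s i j = true) :
    ∃ pi pj, PySem.List.pyGet? s i = some pi ∧ PySem.List.pyGet? s j = some pj ∧ pi ≠ [] := by
  unfold isValidMove at h
  rcases hi : PySem.List.pyGet? s i with _ | pi <;> rcases hj : PySem.List.pyGet? s j with _ | pj <;>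
    rw [hi, hj] at h <;> simp at h ⊢
  exact h.1

lemma moveF_mem_TFin {s : List (List Int)} {i j : Int} (hi : 0 ≤ i) (hj : 0 ≤ j)
    (hij : i ≠ j) (hv : isValidMove s i j = true) : moveF s i j ∈ TFin s := by
  rcases isValidMove_elim hv with ⟨pi, pj, hgi, hgj, hpi⟩
  have hia : PySem.List.pyGet? s i = s[i.toNat]? := PySem.List.pyGet?_of_nonneg s hi
  have hja : PySem.List.pyGet? s j = s[j.toNat]? := PySem.List.pyGet?_of_nonneg s hj
  rw [hia] at hgi; rw [hja] at hgj
  have ha : i.toNat < s.length := by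
    by_contra hc
    rw [List.getElem?_eq_none (by omega)] at hgi; simp at hgi
  have hb : j.toNat < s.length := by
    by_contra hc
    rw [List.getElem?_eq_none (by omega)] at hgj; simp at hgj
  have hab : i.toNat ≠ j.toNat := by
    intro hc; exact hij (by omega)
  have hpi' : s[i.toNat] = pi := by
    rw [List.getElem?_eq_getElem ha] at hgi; exact Option.some.inj hgi
  have hpj' : s[j.toNat] = pj := by
    rw [List.getElem?_eq_getElem hb] at hgj; exact Option.some.inj hgj
  -- unfold moveF to set operations
  have hm : moveF s i j =
      (s.set i.toNat pi.dropLast).set j.toNat (pj ++ [pi.getLast hpi]) := by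
    simp only [moveF]
    rw [PySem.List.pyGetD_eq_getElem s ([] : List Int) hi (by omega), hpi']
    rw [PySem.List.pySetD_of_nonneg s _ hi, PySem.List.pySetD_of_nonneg _ _ hj]
    rw [PySem.List.pyGetD_neg_one pi 0 hpi]
    rw [PySem.List.pyGetD_eq_getElem _ ([] : List Int) hj (by simp; omega)]
    rw [List.getElem_set_ne (by omega), hpj']
  rw [hm]
  refine mem_TFin.2 ⟨by simp, ?_⟩
  rw [← Multiset.coe_eq_coe]
  have h1 := flatten_set_ms s i.toNat ha pi.dropLast
  have h2 := flatten_set_ms (s.set i.toNat pi.dropLast) j.toNat (by simpa using hb)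
      (pj ++ [pi.getLast hpi])
  rw [List.getElem_set_ne (by omega), hpj'] at h2
  rw [hpi'] at h1
  have key : ((((s.set i.toNat pi.dropLast).set j.toNat (pj ++ [pi.getLast hpi])).flatten :
      Multiset Int)) + (↑pj + ↑pi) = (↑s.flatten + ↑pi) + ↑pj := by
    calc (((s.set i.toNat pi.dropLast).set j.toNat (pj ++ [pi.getLast hpi])).flatten :
        Multiset Int) + (↑pj + ↑pi)
        = ((((s.set i.toNat pi.dropLast).set j.toNat (pj ++ [pi.getLast hpi])).flatten :
            Multiset Int) + ↑pj) + ↑pi := by abel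
      _ = (((s.set i.toNat pi.dropLast).flatten : Multiset Int) + ↑(pj ++ [pi.getLast hpi])) + ↑pi := by rw [h2]
      _ = (((s.set i.toNat pi.dropLast).flatten : Multiset Int) + ↑pi) + ↑(pj ++ [pi.getLast hpi]) := by abel
      _ = (((s.set i.toNat pi.dropLast).flatten : Multiset Int) + ↑pi) + (↑pj + ↑([pi.getLast hpi] : List Int)) := by simp only [← Multiset.coe_add]
      _ = (↑s.flatten + ↑pi.dropLast) + (↑pj + ↑([pi.getLast hpi] : List Int)) := by rw [h1]
      _ = (↑s.flatten + (↑pi.dropLast + ↑([pi.getLast hpi] : List Int))) + ↑pj := by abel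
      _ = (↑s.flatten + ↑(pi.dropLast ++ [pi.getLast hpi])) + ↑pj := by simp only [← Multiset.coe_add]
      _ = (↑s.flatten + ↑pi) + ↑pj := by rw [List.dropLast_append_getLast hpi]
  have := add_right_cancel (a := (((s.set i.toNat pi.dropLast).set j.toNat
      (pj ++ [pi.getLast hpi])).flatten : Multiset Int)) (b := ↑pj + ↑pi)
      (c := (↑s.flatten : Multiset Int))
  apply this
  rw [key]; abel

-- ---- PySem.Set.add as a Finset insert ----
lemma add_toFinset (v : List (List (List Int))) (s : List (List Int)) :
    (PySem.Set.add v s).toFinset = insert s v.toFinset := by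
  ext x
  simp [PySem.Set.mem_add]
  tauto

-- ---- A only grows `visited`, and never inserts the goal ----
def VOK (g : List (List Int)) (v v' : List (List (List Int))) : Prop :=
  (∀ x ∈ v, x ∈ v') ∧ (∀ x ∈ v', x ∈ v ∨ x ≠ g)

lemma vok_refl (g : List (List Int)) (v : List (List (List Int))) : VOK g v v :=
  ⟨fun _ h => h, fun _ h => Or.inl h⟩

lemma vok_trans {g : List (List Int)} {v1 v2 v3 : List (List (List Int))}
    (h1 : VOK g v1 v2) (h2 : VOK g v2 v3) : VOK g v1 v3 := by
  refine ⟨fun x hx => h2.1 x (h1.1 x hx), fun x hx => ?_⟩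
  rcases h2.2 x hx with h | h
  · exact h1.2 x h
  · exact Or.inr h

lemma goA_vok (g : List (List Int))
    (rec : List (List Int) → List (List Int) → List (List (List Int)) → List (Int × Int) →
      Option (Option (List (Int × Int)) × List (List (List Int))))
    (hrec : ∀ s v p r v', rec s g v p = some (r, v') → VOK g v v') :
    ∀ (pairs : List (Int × Int)) s v p r v',
      goA rec pairs s g v p = some (r, v') → VOK g v v' := by
  intro pairs
  induction pairs with
  | nil =>
    intro s v p r v' h
    simp only [goA] at h
    obtain ⟨rfl, rfl⟩ : none = r ∧ v = v' := by
      constructor <;> [exact congrArg Prod.fst (Option.some.inj h); exact congrArg Prod.snd (Option.some.inj h)]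
    exact vok_refl g v
  | cons ij rest ih =>
    obtain ⟨i, j⟩ := ij
    intro s v p r v' h
    simp only [goA] at h
    split at h
    · split at h
      · exact ih s v p r v' h
      · rcases hm : rec (moveF s i j) g v (p ++ [(i, j)]) with _ | ⟨rc, vc⟩ <;>
          rw [hm] at h <;> dsimp only at h
        · exact absurd h (by simp)
        · have hstep := hrec _ _ _ _ _ hm
          split at h
          · obtain ⟨rfl, rfl⟩ : rc = r ∧ vc = v' := by
              constructor <;> [exact congrArg Prod.fst (Option.some.inj h); exact congrArg Prod.snd (Option.some.inj h)]
            exact hstep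
          · exact vok_trans hstep (ih s vc p r v' h)
    · exact ih s v p r v' h

lemma dfsA_vok : ∀ (f : Nat) (s g : List (List Int)) (v : List (List (List Int)))
    (p : List (Int × Int)) (r : Option (List (Int × Int))) (v' : List (List (List Int))),
    dfsA f s g v p = some (r, v') → VOK g v v' := by
  intro f
  induction f with
  | zero => intro s g v p r v' h; exact absurd h (by simp [dfsA])
  | succ f ih =>
    intro s g v p r v' h
    simp only [dfsA] at h
    split at h
    · obtain ⟨rfl, rfl⟩ : some p = r ∧ v = v' := by
        constructor <;> [exact congrArg Prod.fst (Option.some.inj h); exact congrArg Prod.snd (Option.some.inj h)]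
      exact vok_refl g v
    · rename_i hsg
      have h2 := goA_vok g (dfsA f) (fun s v p r v' hh => ih s g v p r v' hh) _ _ _ _ _ _ h
      refine vok_trans ⟨fun x hx => (PySem.Set.mem_add _ _ _).2 (Or.inl hx), fun x hx => ?_⟩ h2
      rcases (PySem.Set.mem_add _ _ _).1 hx with hx | rfl
      · exact Or.inl hx
      · exact Or.inr hsg

-- A's loop result is either None or truthy
lemma goA_falsy (rec : List (List Int) → List (List Int) → List (List (List Int)) → List (Int × Int) →
      Option (Option (List (Int × Int)) × List (List (List Int)))) :
    ∀ (pairs : List (Int × Int)) s g v p r v',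
      goA rec pairs s g v p = some (r, v') → truthy r = false → r = none := by
  intro pairs
  induction pairs with
  | nil =>
    intro s g v p r v' h _
    simp only [goA] at h
    exact (congrArg Prod.fst (Option.some.inj h)).symm
  | cons ij rest ih =>
    obtain ⟨i, j⟩ := ij
    intro s g v p r v' h hf
    simp only [goA] at h
    split at h
    · split at h
      · exact ih _ _ _ _ _ _ h hf
      · rcases hm : rec (moveF s i j) g v (p ++ [(i, j)]) with _ | ⟨rc, vc⟩ <;>
          rw [hm] at h <;> dsimp only at h
        · exact absurd h (by simp)
        · split at h
          · rename_i ht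
            have : rc = r := congrArg Prod.fst (Option.some.inj h)
            subst this; rw [ht] at hf; exact absurd hf (by simp)
          · exact ih _ _ _ _ _ _ h hf
    · exact ih _ _ _ _ _ _ h hf

lemma pairsAll_nonneg : ∀ ij ∈ pairsAll, 0 ≤ ij.1 ∧ 0 ≤ ij.2 := by decide

-- ---- fuel sufficiency for A ----
lemma goA_some_aux (f : Nat) (g : List (List Int))
    (ihf : ∀ s v p, (TFin s \ insert s v.toFinset).card < f → (dfsA f s g v p).isSome) :
    ∀ (pairs : List (Int × Int)), (∀ ij ∈ pairs, 0 ≤ ij.1 ∧ 0 ≤ ij.2) →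
    ∀ (s : List (List Int)) (v : List (List (List Int))) (p : List (Int × Int)),
      s ∈ v → (TFin s \ v.toFinset).card ≤ f → (goA (dfsA f) pairs s g v p).isSome := by
  intro pairs
  induction pairs with
  | nil => intro _ s v p _ _; simp [goA]
  | cons ij rest ih =>
    obtain ⟨i, j⟩ := ij
    intro hnn s v p hsv hcard
    have hnn' : ∀ ij ∈ rest, 0 ≤ ij.1 ∧ 0 ≤ ij.2 := fun ij h => hnn ij (List.mem_cons_of_mem _ h)
    simp only [goA]
    split
    · rename_i hval
      by_cases hns : moveF s i j ∈ v
      · simp only [if_pos hns]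
        exact ih hnn' s v p hsv hcard
      · simp only [if_neg hns]
        have h0 := hnn (i, j) List.mem_cons_self
        have hmem : moveF s i j ∈ TFin s :=
          moveF_mem_TFin h0.1 h0.2 hval.1 (by exact_mod_cast hval.2)
        have hlt : (TFin (moveF s i j) \ insert (moveF s i j) v.toFinset).card < f := by
          rw [TFin_congr hmem]
          have hss : TFin s \ insert (moveF s i j) v.toFinset ⊂ TFin s \ v.toFinset := by
            constructor
            · intro x hx
              simp only [Finset.mem_sdiff, Finset.mem_insert] at hx ⊢
              exact ⟨hx.1, fun hc => hx.2 (Or.inr hc)⟩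
            · intro hsub
              have h1 : moveF s i j ∈ TFin s \ v.toFinset := by
                simp only [Finset.mem_sdiff, List.mem_toFinset]; exact ⟨hmem, hns⟩
              have h2 := hsub h1
              simp [Finset.mem_sdiff, Finset.mem_insert] at h2
          exact lt_of_lt_of_le (Finset.card_lt_card hss) hcard
        have hs := ihf (moveF s i j) v (p ++ [(i, j)]) hlt
        rcases hm : dfsA f (moveF s i j) g v (p ++ [(i, j)]) with _ | ⟨rc, vc⟩
        · rw [hm] at hs; exact absurd hs (by simp)
        · simp only [hm]
          split
          · simp
          · have hvok := dfsA_vok f _ g v _ rc vc hm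
            refine ih hnn' s vc p (hvok.1 s hsv) ?_
            refine le_trans (Finset.card_le_card (Finset.sdiff_subset_sdiff (Finset.Subset.refl _) ?_)) hcard
            intro x hx
            simp only [List.mem_toFinset] at hx ⊢
            exact hvok.1 x hx
    · exact ih hnn' s v p hsv hcard

lemma dfsA_some : ∀ (f : Nat) (s g : List (List Int)) (v : List (List (List Int)))
    (p : List (Int × Int)), (TFin s \ insert s v.toFinset).card < f →
    (dfsA f s g v p).isSome := by
  intro f
  induction f with
  | zero => intro s g v p h; exact absurd h (Nat.not_lt_zero _)
  | succ f ih =>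
    intro s g v p h
    by_cases hsg : s = g
    · simp [dfsA, hsg]
    · simp only [dfsA, if_neg hsg]
      refine goA_some_aux f g (fun s v p hh => ih s g v p hh) pairsAll pairsAll_nonneg
        s (PySem.Set.add v s) p ((PySem.Set.mem_add _ _ _).2 (Or.inr rfl)) ?_
      rw [add_toFinset]
      omega

lemma card_lt_stBound (s : List (List Int)) (X : Finset (List (List Int))) :
    (TFin s \ X).card < stBound s := by
  unfold stBound
  have h1 : (TFin s \ X).card ≤ (TFin s).card := Finset.card_le_card (Finset.sdiff_subset)
  have h2 := card_TFin_le s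
  omega

-- ---- childrenOf as filter+map, and its size ----
lemma childrenOf_eq (s : List (List Int)) (p : List (Int × Int)) (v : List (List (List Int))) :
    childrenOf s p v =
      (pairsAll.filter (fun ij => decide (ij.1 ≠ ij.2) && isValidMove s ij.1 ij.2 &&
          decide (moveF s ij.1 ij.2 ∉ v))).map
        (fun ij => (moveF s ij.1 ij.2, p ++ [ij])) := by
  unfold childrenOf
  rw [PySem.List.foldl_append_if]
  simp

lemma length_childrenOf_le (s : List (List Int)) (p : List (Int × Int))
    (v : List (List (List Int))) : (childrenOf s p v).length ≤ 9 := by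
  rw [childrenOf_eq, List.length_map]
  exact le_trans (List.length_filter_le _ _) (by decide)

lemma mem_childrenOf {s : List (List Int)} {p : List (Int × Int)} {v : List (List (List Int))}
    {x : List (List Int) × List (Int × Int)} (h : x ∈ childrenOf s p v) :
    ∃ i j, (i, j) ∈ pairsAll ∧ i ≠ j ∧ isValidMove s i j = true ∧ moveF s i j ∉ v ∧
      x = (moveF s i j, p ++ [(i, j)]) := by
  rw [childrenOf_eq] at h
  rcases List.mem_map.1 h with ⟨⟨i, j⟩, hij, rfl⟩
  rcases List.mem_filter.1 hij with ⟨hmem, hcond⟩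
  simp only [Bool.and_eq_true, decide_eq_true_eq] at hcond
  exact ⟨i, j, hmem, hcond.1.1, hcond.1.2, hcond.2, rfl⟩

-- ---- fuel monotonicity and sufficiency for B ----
lemma loopB_mono : ∀ (f : Nat) (st : List (List (List Int) × List (Int × Int)))
    (g : List (List Int)) (v : List (List (List Int)))
    (o : Option (List (Int × Int)) × List (List (List Int))),
    loopB f st g v = some o → loopB (f + 1) st g v = some o := by
  intro f
  induction f with
  | zero => intro st g v o h; exact absurd h (by simp [loopB])
  | succ f ih =>
    intro st g v o h
    match st with
    | [] => exact h
    | (s, p) :: rest =>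
      by_cases h1 : s = g
      · simp only [loopB, if_pos h1] at h ⊢
        exact h
      · by_cases h2 : s ∈ v
        · simp only [loopB, if_neg h1, if_pos h2] at h ⊢
          exact ih _ _ _ _ h
        · simp only [loopB, if_neg h1, if_neg h2] at h ⊢
          exact ih _ _ _ _ h

lemma loopB_mono_le {f f' : Nat} (hle : f ≤ f')
    {st : List (List (List Int) × List (Int × Int))} {g : List (List Int)}
    {v : List (List (List Int))} {o : Option (List (Int × Int)) × List (List (List Int))}
    (h : loopB f st g v = some o) : loopB f' st g v = some o := by
  obtain ⟨k, rfl⟩ : ∃ k, f' = f + k := ⟨f' - f, by omega⟩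
  clear hle
  induction k with
  | zero => exact h
  | succ k ih => exact loopB_mono (f + k) _ _ _ _ ih

lemma loopB_det {f1 f2 : Nat} {st : List (List (List Int) × List (Int × Int))}
    {g : List (List Int)} {v : List (List (List Int))}
    {o1 o2 : Option (List (Int × Int)) × List (List (List Int))}
    (h1 : loopB f1 st g v = some o1) (h2 : loopB f2 st g v = some o2) : o1 = o2 := by
  have e1 := loopB_mono_le (Nat.le_max_left f1 f2) h1
  have e2 := loopB_mono_le (Nat.le_max_right f1 f2) h2
  rw [e1] at e2
  exact Option.some.inj e2

lemma loopB_some : ∀ (f : Nat) (U : Finset (List (List Int))) (g : List (List Int))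
    (v : List (List (List Int))) (st : List (List (List Int) × List (Int × Int))),
    (∀ sp ∈ st, sp.1 ∈ U ∧ TFin sp.1 = U) →
    9 * (U \ v.toFinset).card + st.length < f → (loopB f st g v).isSome := by
  intro f
  induction f with
  | zero => intro U g v st _ h; exact absurd h (Nat.not_lt_zero _)
  | succ f ih
  => intro U g v st hinv hfuel
     match st with
     | [] => simp [loopB]
     | (s, p) :: rest =>
       simp only [loopB]
       split
       · simp
       · split
         · refine ih U g v rest (fun sp h => hinv sp (List.mem_cons_of_mem _ h)) ?_
           simp only [List.length_cons] at hfuel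
           omega
         · rename_i hsg hsv
           have hhead := hinv (s, p) List.mem_cons_self
           refine ih U g (PySem.Set.add v s) _ ?_ ?_
           · intro sp hsp
             rcases List.mem_append.1 hsp with hc | hr
             · rcases mem_childrenOf hc with ⟨i, j, hij, hne, hval, _, rfl⟩
               have h0 := pairsAll_nonneg (i, j) hij
               have hmem : moveF s i j ∈ TFin s := moveF_mem_TFin h0.1 h0.2 hne hval
               rw [hhead.2] at hmem
               refine ⟨hmem, ?_⟩
               have := TFin_congr (hhead.2 ▸ hmem : moveF s i j ∈ TFin s)
               rw [this, hhead.2]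
             · exact hinv sp (List.mem_cons_of_mem _ hr)
           · rw [add_toFinset]
             have hsU : s ∈ U \ v.toFinset := by
               simp only [Finset.mem_sdiff, List.mem_toFinset]
               exact ⟨hhead.1, hsv⟩
             have hcard : (U \ insert s v.toFinset).card = (U \ v.toFinset).card - 1 := by
               rw [Finset.sdiff_insert, Finset.card_erase_of_mem hsU]
             have hpos : 1 ≤ (U \ v.toFinset).card := Finset.card_pos.2 ⟨s, hsU⟩ 
             have hlen : (childrenOf s p (PySem.Set.add v s) ++ rest).length ≤ 9 + rest.length := by
               rw [List.length_append]
               have := length_childrenOf_le s p (PySem.Set.add v s)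
               omega
             simp only [List.length_cons] at hfuel
             omega

-- ---- simulation: A's recursive traversal equals B's stack traversal ----
def LB (st : List (List (List Int) × List (Int × Int))) (g : List (List Int))
    (v : List (List (List Int))) (o : Option (List (Int × Int)) × List (List (List Int))) : Prop :=
  ∃ f, loopB f st g v = some o

lemma LB_nil (g : List (List Int)) (v : List (List (List Int))) : LB [] g v (none, v) :=
  ⟨1, rfl⟩

lemma LB_goal {s g : List (List Int)} {p : List (Int × Int)}
    {rest : List (List (List Int) × List (Int × Int))} {v : List (List (List Int))}
    (hsg : s = g) : LB ((s, p) :: rest) g v (some p, v) :=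
  ⟨1, by simp [loopB, hsg]⟩

lemma LB_skip {s g : List (List Int)} {p : List (Int × Int)}
    {rest : List (List (List Int) × List (Int × Int))} {v : List (List (List Int))}
    {o : Option (List (Int × Int)) × List (List (List Int))}
    (hsg : s ≠ g) (hsv : s ∈ v) (h : LB rest g v o) : LB ((s, p) :: rest) g v o := by
  rcases h with ⟨f, hf⟩
  refine ⟨f + 1, ?_⟩
  simp only [loopB, if_neg hsg, if_pos hsv]
  exact hf

lemma LB_expand {s g : List (List Int)} {p : List (Int × Int)}
    {rest : List (List (List Int) × List (Int × Int))} {v : List (List (List Int))}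
    {o : Option (List (Int × Int)) × List (List (List Int))}
    (hsg : s ≠ g) (hsv : s ∉ v)
    (h : LB (childrenOf s p (PySem.Set.add v s) ++ rest) g (PySem.Set.add v s) o) :
    LB ((s, p) :: rest) g v o := by
  rcases h with ⟨f, hf⟩
  refine ⟨f + 1, ?_⟩
  simp only [loopB, if_neg hsg, if_neg hsv]
  exact hf

-- the children a pop of s would push, filtered at push time by the set w
def cList (pairs : List (Int × Int)) (s : List (List Int)) (p : List (Int × Int))
    (w : List (List (List Int))) : List (List (List Int) × List (Int × Int)) :=
  (pairs.filter (fun ij => decide (ij.1 ≠ ij.2) && isValidMove s ij.1 ij.2 &&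
      decide (moveF s ij.1 ij.2 ∉ w))).map (fun ij => (moveF s ij.1 ij.2, p ++ [ij]))

lemma childrenOf_cList (s : List (List Int)) (p : List (Int × Int))
    (v : List (List (List Int))) : childrenOf s p v = cList pairsAll s p v := by
  rw [childrenOf_eq]; rfl

def SimConc (s g : List (List Int)) (v : List (List (List Int))) (p : List (Int × Int))
    (r : Option (List (Int × Int))) (v' : List (List (List Int))) : Prop :=
  (truthy r = true → ∀ rest, LB ((s, p) :: rest) g v (r, v')) ∧
  (truthy r = false → ∀ rest o, LB rest g v' o → LB ((s, p) :: rest) g v o)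

lemma simGo (f : Nat)
    (ihd : ∀ s g v p r v', dfsA f s g v p = some (r, v') → p ≠ [] → s ∉ v →
      SimConc s g v p r v') :
    ∀ (pairs : List (Int × Int)) (s g : List (List Int)) (v w : List (List (List Int)))
      (p : List (Int × Int)) (r : Option (List (Int × Int))) (v' : List (List (List Int))),
      goA (dfsA f) pairs s g v p = some (r, v') →
      (∀ x ∈ w, x ∈ v) → (g ∈ v → g ∈ w) →
      ((truthy r = true → ∀ rest, LB (cList pairs s p w ++ rest) g v (r, v')) ∧
       (truthy r = false → ∀ rest o, LB rest g v' o → LB (cList pairs s p w ++ rest) g v o)) := by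
  intro pairs
  induction pairs with
  | nil =>
    intro s g v w p r v' h hwv hgw
    simp only [goA] at h
    obtain ⟨rfl, rfl⟩ : none = r ∧ v = v' := by
      constructor <;> [exact congrArg Prod.fst (Option.some.inj h); exact congrArg Prod.snd (Option.some.inj h)]
    refine ⟨fun ht => absurd ht (by simp [truthy]), fun _ rest o ho => ?_⟩
    simpa [cList] using ho
  | cons ij rest' ih =>
    obtain ⟨i, j⟩ := ij
    intro s g v w p r v' h hwv hgw
    simp only [goA] at h
    by_cases hv1 : i ≠ j ∧ isValidMove s i j = true
    · rw [if_pos hv1] at h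
      by_cases hcv : moveF s i j ∈ v
      · rw [if_pos hcv] at h
        by_cases hcw : moveF s i j ∈ w
        · have hcl : cList ((i, j) :: rest') s p w = cList rest' s p w := by
            simp [cList, hcw]
          rw [hcl]
          exact ih s g v w p r v' h hwv hgw
        · have hcl : cList ((i, j) :: rest') s p w =
              (moveF s i j, p ++ [(i, j)]) :: cList rest' s p w := by
            simp [cList, hv1.1, hv1.2, hcw]
          have hcg : moveF s i j ≠ g := by
            intro hc
            apply hcw
            rw [hc]
            exact hgw (by rwa [hc] at hcv)
          obtain ⟨C1, C2⟩ := ih s g v w p r v' h hwv hgw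
          rw [hcl]
          constructor
          · intro ht rest
            exact LB_skip hcg hcv (C1 ht rest)
          · intro hf rest o ho
            exact LB_skip hcg hcv (C2 hf rest o ho)
      · rw [if_neg hcv] at h
        rcases hm : dfsA f (moveF s i j) g v (p ++ [(i, j)]) with _ | ⟨rc, vc⟩ <;>
          rw [hm] at h <;> dsimp only at h
        · exact absurd h (by simp)
        · have hcw : moveF s i j ∉ w := fun hx => hcv (hwv _ hx)
          have hcl : cList ((i, j) :: rest') s p w =
              (moveF s i j, p ++ [(i, j)]) :: cList rest' s p w := by
            simp [cList, hv1.1, hv1.2, hcw]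
          have hd := ihd (moveF s i j) g v (p ++ [(i, j)]) rc vc hm (by simp) hcv
          rw [hcl]
          split at h
          · rename_i htc
            obtain ⟨rfl, rfl⟩ : rc = r ∧ vc = v' := by
              constructor <;> [exact congrArg Prod.fst (Option.some.inj h); exact congrArg Prod.snd (Option.some.inj h)]
            refine ⟨fun _ rest => hd.1 htc _, fun hf => absurd htc (by simp [hf])⟩
          · rename_i htc
            have hfc : truthy rc = false := by
              cases hrc : truthy rc
              · rfl
              · exact absurd hrc htc
            have hvok := dfsA_vok f (moveF s i j) g v _ rc vc hm
            obtain ⟨C1, C2⟩ := ih s g vc w p r v' h (fun x hx => hvok.1 x (hwv x hx))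
              (fun hgv => by
                rcases hvok.2 g hgv with hgv' | hne
                · exact hgw hgv'
                · exact absurd rfl hne)
            constructor
            · intro ht rest
              exact hd.2 hfc _ _ (C1 ht rest)
            · intro hf rest o ho
              exact hd.2 hfc _ _ (C2 hf rest o ho)
    · rw [if_neg hv1] at h
      have hcl : cList ((i, j) :: rest') s p w = cList rest' s p w := by
        rcases Decidable.not_and_iff_not_or_not.1 hv1 with hne | hval
        · simp [cList, Decidable.not_not.1 hne]
        · simp [cList, eq_false_of_ne_true hval]
      rw [hcl]
      exact ih s g v w p r v' h hwv hgw

lemma simD : ∀ (f : Nat) (s g : List (List Int)) (v : List (List (List Int)))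
    (p : List (Int × Int)) (r : Option (List (Int × Int))) (v' : List (List (List Int))),
    dfsA f s g v p = some (r, v') → p ≠ [] → s ∉ v → SimConc s g v p r v' := by
  intro f
  induction f with
  | zero => intro s g v p r v' h _ _; exact absurd h (by simp [dfsA])
  | succ f ih =>
    intro s g v p r v' h hp hsv
    simp only [dfsA] at h
    split at h
    · rename_i hsg
      obtain ⟨rfl, rfl⟩ : some p = r ∧ v = v' := by
        constructor <;> [exact congrArg Prod.fst (Option.some.inj h); exact congrArg Prod.snd (Option.some.inj h)]
      constructor
      · intro _ rest
        exact LB_goal hsg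
      · intro hf
        simp [truthy, List.isEmpty_iff, hp] at hf
    · rename_i hsg
      obtain ⟨C1, C2⟩ := simGo f ih pairsAll s g (PySem.Set.add v s) (PySem.Set.add v s) p r v' h
        (fun x hx => hx) (fun hx => hx)
      constructor
      · intro ht rest
        refine LB_expand hsg hsv ?_
        rw [childrenOf_cList]
        exact C1 ht rest
      · intro hf rest o ho
        refine LB_expand hsg hsv ?_
        rw [childrenOf_cList]
        exact C2 hf rest o ho

-- ===== VERDICT (by name: the statement is the Claim_ definition above) =====
theorem dfs_spec : Claim_equal_dfs := by
  unfold Claim_equal_dfs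
  intro state goal visited path _ hpre
  unfold Spec_dfs
  by_cases hsg : state = goal
  · have hA : dfs state goal visited path = some path := by
      unfold dfs stBound
      simp [dfsA, hsg]
    have hB : dfs_alt state goal visited path = some path := by
      obtain ⟨k, hk⟩ : ∃ k, bBound state = k + 1 := ⟨9 * stBound state + 1, by unfold bBound; omega⟩
      unfold dfs_alt
      rw [hk]
      simp [loopB, hsg]
    rw [hA, hB]
  · have hsv : state ∉ visited := (hpre.resolve_left hsg).2
    have hsome := dfsA_some (stBound state) state goal visited path
      (card_lt_stBound state (insert state visited.toFinset))
    rcases hA : dfsA (stBound state) state goal visited path with _ | ⟨r, v'⟩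
    · rw [hA] at hsome; exact absurd hsome (by simp)
    · have hdfs : dfs state goal visited path = r := by
        unfold dfs; rw [hA]
      obtain ⟨M, hM⟩ : ∃ M, stBound state = M + 1 :=
        ⟨(state.flatten.length).factorial * (state.flatten.length + 1) ^ state.length, rfl⟩
      rw [hM] at hA
      simp only [dfsA, if_neg hsg] at hA
      have hLB : LB [(state, path)] goal visited (r, v') := by
        obtain ⟨C1, C2⟩ := simGo M (fun s g v p r v' hh hp hs => simD M s g v p r v' hh hp hs)
          pairsAll state goal (PySem.Set.add visited state) (PySem.Set.add visited state)
          path r v' hA (fun x hx => hx) (fun hx => hx)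
        cases htr : truthy r
        · have hr : r = none := goA_falsy (dfsA M) pairsAll state goal _ path r v' hA htr
          subst hr
          refine LB_expand hsg hsv ?_
          rw [childrenOf_cList]
          have := C2 rfl [] (none, v') (LB_nil goal v')
          simpa using this
        · refine LB_expand hsg hsv ?_
          rw [childrenOf_cList]
          have := C1 htr []
          simpa using this
      have hBsome := loopB_some (bBound state) (TFin state) goal visited [(state, path)]
        (by
          intro sp hsp
          simp only [List.mem_singleton] at hsp
          subst hsp
          exact ⟨self_mem_TFin state, rfl⟩)
        (by
          have := card_lt_stBound state (visited.toFinset)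
          unfold bBound
          simp only [List.length_cons, List.length_nil]
          omega)
      rcases hB : loopB (bBound state) [(state, path)] goal visited with _ | o
      · rw [hB] at hBsome; exact absurd hBsome (by simp)
      · rcases hLB with ⟨fB, hfB⟩
        have hdet := loopB_det hfB hB
        have hAlt : dfs_alt state goal visited path = o.1 := by
          unfold dfs_alt
          rw [hB]
        rw [hdfs, hAlt, ← hdet]
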